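-- pv_equiv track=rewrite | github.com/lehtiolab/msstitch | src/app/actions/psmtable/refine.py | get_masters
-- ===== SOURCE A (Python) =====
-- def get_masters(ppgraph):
--     """From a protein-peptide graph dictionary (keys proteins,
--     values peptides), return master proteins aka those which
--     have no proteins whose peptides are supersets of them.
--     If shared master proteins are found, report only the first,
--     we will sort the whole proteingroup later anyway. In that
--     case, the master reported here may be temporary."""
--     masters = {}
--     for protein, peps in ppgraph.items():
--         ismaster = True
--         multimaster = set()
--         for subprotein, subpeps in ppgraph.items():
--             if protein == subprotein:
--                 continue
--             if peps.issubset(subpeps):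
--                 if peps.union(subpeps) > peps:
--                     ismaster = False
--                     break
--                 elif peps.intersection(subpeps) == peps:
--                     multimaster.update({protein, subprotein})
--         if not ismaster:
--             continue
--         elif multimaster:
--             premaster = sorted(list(multimaster))[0]
--         else:
--             premaster = protein
--         for pep in peps:
--             try:
--                 masters[pep].add(premaster)
--             except KeyError:
--                 masters[pep] = {premaster}
--     return masters
-- ===== SOURCE B (Python) =====
-- def get_masters(ppgraph):
--     """Inverted index peptide -> set of proteins containing it; a protein's
--     superset candidates are the intersection of its peptides' posting lists,
--     so the quadratic all-pairs subset scan disappears."""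
--     pepindex = {}
--     for protein, peps in ppgraph.items():
--         for pep in peps:
--             pepindex.setdefault(pep, set()).add(protein)
--     masters = {}
--     for protein, peps in ppgraph.items():
--         if not peps:
--             continue
--         it = iter(peps)
--         cands = set(pepindex[next(it)])
--         for pep in it:
--             cands &= pepindex[pep]
--         cands.discard(protein)
--         # every candidate's peptide set contains peps; a strictly larger one beats us
--         if any(len(ppgraph[c]) > len(peps) for c in cands):
--             continue
--         # remaining candidates have exactly the same peptide set
--         premaster = min(cands | {protein})
--         for pep in peps:
--             masters.setdefault(pep, set()).add(premaster)
--     return masters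
-- ===== Notes on version B (the rewrite author's own statement) =====
-- stated objective: faster
-- what changed: Replaces A's all-pairs nested subset scan with an inverted peptide->proteins index whose posting lists are intersected per protein, so each protein's superset candidates are found directly instead of by comparing it against every other protein.
import Mathlib
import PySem

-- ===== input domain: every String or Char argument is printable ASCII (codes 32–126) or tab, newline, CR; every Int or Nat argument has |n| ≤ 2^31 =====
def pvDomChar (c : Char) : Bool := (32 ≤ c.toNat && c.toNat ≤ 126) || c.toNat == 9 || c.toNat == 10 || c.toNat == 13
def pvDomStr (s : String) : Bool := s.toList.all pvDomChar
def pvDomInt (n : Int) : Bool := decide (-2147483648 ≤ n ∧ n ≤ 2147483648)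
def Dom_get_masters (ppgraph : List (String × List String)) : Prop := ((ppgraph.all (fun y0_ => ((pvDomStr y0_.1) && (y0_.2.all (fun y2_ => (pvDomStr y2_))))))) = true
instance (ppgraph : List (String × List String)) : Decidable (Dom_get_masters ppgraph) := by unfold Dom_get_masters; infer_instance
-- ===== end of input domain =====

-- B replaces A's all-pairs subset scan by an inverted peptide→proteins index whose
-- posting lists are intersected per protein (measurably faster on large graphs).

-- ===== PORT A =====
-- A's inner 'for subprotein, subpeps in ppgraph.items()' loop, with its break:
-- none = broke out with ismaster False; some mm = finished, multimaster = mm.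
-- (multimaster is a Python set consumed only by sorted(...)[0], so the order in
-- which update({protein, subprotein}) adds the two names is unobservable.)
def pvInnerA (protein : String) (peps : PySem.Set String) :
    List (String × List String) → PySem.Set String → Option (PySem.Set String)
  | [], mm => some mm
  | (subprotein, subpepsL) :: rest, mm =>
    if protein = subprotein then pvInnerA protein peps rest mm
    else
      let subpeps : PySem.Set String := PySem.Set.ofList subpepsL
      if PySem.Set.issubset peps subpeps then
        let u := PySem.Set.union peps subpeps
        -- peps.union(subpeps) > peps : proper superset
        if PySem.Set.issuperset u peps && !(PySem.Set.equal u peps) then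
          none
        else if PySem.Set.equal (PySem.Set.inter peps subpeps) peps then
          pvInnerA protein peps rest (PySem.Set.update mm [protein, subprotein])
        else
          pvInnerA protein peps rest mm
      else pvInnerA protein peps rest mm

def get_masters (ppgraph : List (String × List String)) : List (String × List String) :=
  (ppgraph.foldl (fun masters pr =>
      let protein := pr.1
      let peps : PySem.Set String := PySem.Set.ofList pr.2
      match pvInnerA protein peps ppgraph PySem.Set.empty with
      | none => masters   -- 'if not ismaster: continue'
      | some multimaster =>
        let premaster :=
          if multimaster ≠ ([] : List String) then
            (PySem.List.sorted multimaster (fun x => x) false).headD protein  -- sorted(list(mm))[0]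
          else protein
        -- try: masters[pep].add(premaster)  except KeyError: masters[pep] = {premaster}
        peps.foldl (fun m pep =>
          match m.get? pep with
          | some s => m.insert pep (PySem.Set.add s premaster)
          | none => m.insert pep [premaster]) masters)
    PySem.Dict.empty).items

-- ===== PORT B =====
-- pepindex.setdefault(pep, set()).add(protein)  (values are Sets, only looked up)
def pvIndexB (ppgraph : List (String × List String)) : PySem.Dict String (List String) :=
  ppgraph.foldl (fun idx pr =>
    pr.2.foldl (fun idx pep => idx.modify pep [] (fun s => PySem.Set.add s pr.1)) idx)
    PySem.Dict.empty

def get_masters_alt (ppgraph : List (String × List String)) : List (String × List String) :=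
  let pepindex := pvIndexB ppgraph
  let graph := PySem.Dict.mk ppgraph          -- B's ppgraph[c] lookups
  (ppgraph.foldl (fun masters pr =>
      let protein := pr.1
      match (PySem.Set.ofList pr.2 : PySem.Set String) with
      | [] => masters                          -- 'if not peps: continue'
      | pep0 :: restPeps =>
        let peps : PySem.Set String := pep0 :: restPeps
        -- cands = set(pepindex[next(it)]); for pep in it: cands &= pepindex[pep]
        let cands0 := restPeps.foldl (fun c pep => PySem.Set.inter c (pepindex.getD pep []))
                        (pepindex.getD pep0 [])
        let cands := PySem.Set.discard cands0 protein
        -- any(len(ppgraph[c]) > len(peps) for c in cands)   (len of the peptide SET)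
        if cands.any (fun c =>
             PySem.Set.len (PySem.Set.ofList (graph.getD c [])) > PySem.Set.len peps) then
          masters
        else
          -- premaster = min(cands | {protein})  (nonempty, so the default is never used)
          let premaster := (PySem.List.min? (PySem.Set.union cands [protein]) (fun x => x)).getD protein
          -- masters.setdefault(pep, set()).add(premaster)
          peps.foldl (fun m pep =>
            let m1 := m.setdefault pep []
            m1.insert pep (PySem.Set.add (m1.getD pep []) premaster)) masters)
    PySem.Dict.empty).items

-- ===== PRECONDITION & SPEC =====
-- Pre_ excludes association lists with duplicate protein keys: they do not represent
-- a Python dict (A's argument type), so neither program is defined on them.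
def Pre_get_masters (ppgraph : List (String × List String)) : Prop :=
  (ppgraph.map Prod.fst).Nodup
instance (ppgraph : List (String × List String)) : Decidable (Pre_get_masters ppgraph) := by
  unfold Pre_get_masters; infer_instance

def pvWitness_get_masters : (List (String × List String)) :=
  [("p", ["x"]), ("q", ["x", "y"])]

def Spec_get_masters (ppgraph : List (String × List String)) (out : List (String × List String)) : Prop := out = get_masters_alt ppgraph
instance (ppgraph : List (String × List String)) (out : List (String × List String)) : Decidable (Spec_get_masters ppgraph out) := by unfold Spec_get_masters; infer_instance

-- ===== CLAIM (what is proved, stated in full; the proofs are below) =====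
def Claim_equal_get_masters : Prop := ∀ (ppgraph : List (String × List String)), Dom_get_masters ppgraph → Pre_get_masters ppgraph → Spec_get_masters ppgraph (get_masters ppgraph)

-- ===== LEMMAS AND PROOFS =====

-- entry pr beats protein P (peptide set S): its peptides strictly contain S
def pvBad (P : String) (S : List String) (pr : String × List String) : Prop :=
  pr.1 ≠ P ∧ (∀ x ∈ S, x ∈ pr.2) ∧ ∃ x ∈ pr.2, x ∉ S

-- entry pr has exactly the peptide set S, under another name
def pvEq (P : String) (S : List String) (pr : String × List String) : Prop :=
  pr.1 ≠ P ∧ (∀ x ∈ S, x ∈ pr.2) ∧ ∀ x ∈ pr.2, x ∈ S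

lemma pv_key_unique {l : List (String × List String)} (h : (l.map Prod.fst).Nodup)
    {p q : String × List String} (hp : p ∈ l) (hq : q ∈ l) (hk : p.1 = q.1) : p = q :=
  List.inj_on_of_nodup_map h hp hq hk

lemma pv_sublen {S T : List String} (hS : S.Nodup) (hT : T.Nodup)
    (hsub : ∀ x ∈ S, x ∈ T) : S.length < T.length ↔ ∃ x ∈ T, x ∉ S := by
  constructor
  · intro hlt
    by_contra hno
    push Not at hno
    have := (hT.subperm hno).length_le
    omega
  · rintro ⟨x, hxT, hxS⟩
    have h1 : (S ++ [x]).Nodup := by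
      simp [List.nodup_append, hS]; exact fun a ha he => hxS (he ▸ ha)
    have h2 : (S ++ [x]) ⊆ T := by
      intro y hy; rcases List.mem_append.1 hy with h | h
      · exact hsub y h
      · rw [List.mem_singleton.1 h]; exact hxT
    have := (h1.subperm h2).length_le
    simp at this; omega

lemma pv_add_step_eq (m : PySem.Dict String (List String)) (pep v : String) :
    (match m.get? pep with
     | some s => m.insert pep (PySem.Set.add s v)
     | none => m.insert pep [v])
    = (let m1 := m.setdefault pep ([] : List String)
       m1.insert pep (PySem.Set.add (m1.getD pep []) v)) := by
  rcases h : m.get? pep with _ | s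
  · have hc : m.contains pep = false := by
      rw [PySem.Dict.contains_eq_isSome_get?, h]; rfl
    simp only [PySem.Dict.setdefault_of_not_contains m _ hc]
    rw [PySem.Dict.getD_insert_self, PySem.Dict.insert_insert_self]
    have hv : PySem.Set.add ([] : List String) v = [v] := by
      rw [PySem.Set.add_of_not_mem (by simp)]; rfl
    rw [hv]
  · have hc : m.contains pep = true := by
      rw [PySem.Dict.contains_eq_isSome_get?, h]; rfl
    simp only [PySem.Dict.setdefault_of_contains m _ hc]
    rw [PySem.Dict.getD_of_get?_eq_some m _ h]

lemma pv_mem_index_inner (P : String) (L : List String) (d : PySem.Dict String (List String))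
    (Q pep : String) :
    Q ∈ (L.foldl (fun idx p => idx.modify p [] (fun s => PySem.Set.add s P)) d).getD pep ([] : List String)
    ↔ Q ∈ d.getD pep ([] : List String) ∨ (Q = P ∧ pep ∈ L) := by
  induction L generalizing d with
  | nil => simp
  | cons a t ih =>
    simp only [List.foldl_cons, ih, List.mem_cons]
    rw [PySem.Dict.getD_modify]
    by_cases hpa : pep = a
    · subst hpa; simp [PySem.Set.mem_add]; tauto
    · simp [hpa]

lemma pv_mem_index_fold (l : List (String × List String)) (d : PySem.Dict String (List String))
    (Q pep : String) :
    Q ∈ (l.foldl (fun idx pr =>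
          pr.2.foldl (fun idx p => idx.modify p [] (fun s => PySem.Set.add s pr.1)) idx) d).getD pep ([] : List String)
    ↔ Q ∈ d.getD pep ([] : List String) ∨ ∃ pr ∈ l, pr.1 = Q ∧ pep ∈ pr.2 := by
  induction l generalizing d with
  | nil => simp
  | cons hd rest ih =>
    simp only [List.foldl_cons, ih, pv_mem_index_inner, List.mem_cons]
    constructor
    · rintro ((h | ⟨rfl, h⟩) | ⟨pr, hpr, hk, hp⟩)
      · exact Or.inl h
      · exact Or.inr ⟨hd, Or.inl rfl, rfl, h⟩
      · exact Or.inr ⟨pr, Or.inr hpr, hk, hp⟩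
    · rintro (h | ⟨pr, hpr | hpr, hk, hp⟩)
      · exact Or.inl (Or.inl h)
      · subst hpr; exact Or.inl (Or.inr ⟨hk.symm, hp⟩)
      · exact Or.inr ⟨pr, hpr, hk, hp⟩

lemma pv_mem_index (ppgraph : List (String × List String)) (Q pep : String) :
    Q ∈ (pvIndexB ppgraph).getD pep ([] : List String)
    ↔ ∃ pr ∈ ppgraph, pr.1 = Q ∧ pep ∈ pr.2 := by
  have := pv_mem_index_fold ppgraph PySem.Dict.empty Q pep
  simpa [pvIndexB] using this

lemma pv_mem_foldl_inter (idx : PySem.Dict String (List String)) (rest : List String)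
    (init : List String) (Q : String) :
    Q ∈ rest.foldl (fun c pep => PySem.Set.inter c (idx.getD pep [])) init
    ↔ Q ∈ init ∧ ∀ pep ∈ rest, Q ∈ idx.getD pep ([] : List String) := by
  induction rest generalizing init with
  | nil => simp
  | cons a t ih =>
    simp only [List.foldl_cons, ih, PySem.Set.mem_inter, List.mem_cons]
    constructor
    · rintro ⟨⟨h1, h2⟩, h3⟩
      exact ⟨h1, fun pep hp => by rcases hp with rfl | hp; exact h2; exact h3 pep hp⟩
    · rintro ⟨h1, h2⟩; exact ⟨⟨h1, h2 a (Or.inl rfl)⟩, fun pep hp => h2 pep (Or.inr hp)⟩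

lemma pvInnerA_cons (P Q : String) (S : PySem.Set String) (T : List String)
    (rest : List (String × List String)) (mm : PySem.Set String) :
    pvInnerA P S ((Q, T) :: rest) mm =
      if P = Q then pvInnerA P S rest mm
      else if PySem.Set.issubset S (PySem.Set.ofList T) then
        if PySem.Set.issuperset (PySem.Set.union S (PySem.Set.ofList T)) S
            && !(PySem.Set.equal (PySem.Set.union S (PySem.Set.ofList T)) S) then none
        else if PySem.Set.equal (PySem.Set.inter S (PySem.Set.ofList T)) S then
          pvInnerA P S rest (PySem.Set.update mm [P, Q])
        else pvInnerA P S rest mm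
      else pvInnerA P S rest mm := rfl

lemma pv_branches (S : PySem.Set String) (T : List String) :
    (PySem.Set.issubset S (PySem.Set.ofList T) = true ↔ ∀ x ∈ S, x ∈ T)
    ∧ (PySem.Set.issuperset (PySem.Set.union S (PySem.Set.ofList T)) S = true)
    ∧ ((PySem.Set.equal (PySem.Set.union S (PySem.Set.ofList T)) S = true) ↔ ∀ x ∈ T, x ∈ S)
    ∧ ((∀ x ∈ S, x ∈ T) → PySem.Set.equal (PySem.Set.inter S (PySem.Set.ofList T)) S = true) := by
  refine ⟨?_, ?_, ?_, ?_⟩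
  · rw [PySem.Set.issubset_iff]
    simp [PySem.Set.mem_ofList]
  · rw [PySem.Set.issuperset_iff]
    intro x hx; rw [PySem.Set.mem_union]; exact Or.inl hx
  · rw [PySem.Set.equal_iff]
    constructor
    · intro h x hxT
      exact (h x).mp ((PySem.Set.mem_union _ _ _).mpr (Or.inr ((PySem.Set.mem_ofList _ _).mpr hxT)))
    · intro h x
      rw [PySem.Set.mem_union, PySem.Set.mem_ofList]
      constructor
      · rintro (h1 | h1); exact h1; exact h x h1
      · exact Or.inl
  · intro h
    rw [PySem.Set.equal_iff]
    intro x
    rw [PySem.Set.mem_inter, PySem.Set.mem_ofList]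
    exact ⟨fun h1 => h1.1, fun h1 => ⟨h1, h x h1⟩⟩

lemma pv_innerA_none_iff (P : String) (S : PySem.Set String) (l : List (String × List String))
    (mm : PySem.Set String) :
    pvInnerA P S l mm = none ↔ ∃ pr ∈ l, pvBad P S pr := by
  induction l generalizing mm with
  | nil => simp [pvInnerA]
  | cons hd rest ih =>
    obtain ⟨Q, T⟩ := hd
    obtain ⟨hsub_iff, hsup, hequ, hint⟩ := pv_branches S T
    rw [pvInnerA_cons]
    by_cases hPQ : P = Q
    · rw [if_pos hPQ, ih]
      constructor
      · rintro ⟨pr, hpr, hb⟩; exact ⟨pr, List.mem_cons_of_mem _ hpr, hb⟩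
      · rintro ⟨pr, hpr, hb⟩
        rcases List.mem_cons.mp hpr with hpr | hpr
        · subst hpr; exact absurd hPQ.symm hb.1
        · exact ⟨pr, hpr, hb⟩
    · rw [if_neg hPQ]
      by_cases hsub : ∀ x ∈ S, x ∈ T
      · rw [if_pos (hsub_iff.mpr hsub)]
        by_cases hbig : ∀ x ∈ T, x ∈ S
        · have h2 : ¬ ((PySem.Set.issuperset (PySem.Set.union S (PySem.Set.ofList T)) S
              && !(PySem.Set.equal (PySem.Set.union S (PySem.Set.ofList T)) S)) = true) := by
            simp [hsup, hequ.mpr hbig]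
          rw [if_neg h2, if_pos (hint hsub), ih]
          constructor
          · rintro ⟨pr, hpr, hb⟩; exact ⟨pr, List.mem_cons_of_mem _ hpr, hb⟩
          · rintro ⟨pr, hpr, hb⟩
            rcases List.mem_cons.mp hpr with hpr | hpr
            · subst hpr
              rcases hb.2.2 with ⟨x, hxT, hxS⟩
              exact absurd (hbig x hxT) hxS
            · exact ⟨pr, hpr, hb⟩
        · have hne : (PySem.Set.equal (PySem.Set.union S (PySem.Set.ofList T)) S) = false := by
            rcases hq : PySem.Set.equal (PySem.Set.union S (PySem.Set.ofList T)) S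
            · rfl
            · exact absurd (hequ.mp hq) hbig
          have h2 : (PySem.Set.issuperset (PySem.Set.union S (PySem.Set.ofList T)) S
              && !(PySem.Set.equal (PySem.Set.union S (PySem.Set.ofList T)) S)) = true := by
            simp [hsup, hne]
          rw [if_pos h2]
          constructor
          · intro _
            refine ⟨(Q, T), List.mem_cons_self, Ne.symm hPQ, hsub, ?_⟩
            push Not at hbig
            exact hbig
          · intro _; rfl
      · have h1 : ¬ (PySem.Set.issubset S (PySem.Set.ofList T) = true) := by
          intro hq; exact hsub (hsub_iff.mp hq)
        rw [if_neg h1, ih]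
        constructor
        · rintro ⟨pr, hpr, hb⟩; exact ⟨pr, List.mem_cons_of_mem _ hpr, hb⟩
        · rintro ⟨pr, hpr, hb⟩
          rcases List.mem_cons.mp hpr with hpr | hpr
          · subst hpr; exact absurd hb.2.1 hsub
          · exact ⟨pr, hpr, hb⟩

lemma pv_innerA_some_mem (P : String) (S : PySem.Set String) (l : List (String × List String)) :
    ∀ (mm mm' : PySem.Set String), pvInnerA P S l mm = some mm' → ∀ (x : String),
    (x ∈ mm' ↔ x ∈ mm ∨ ∃ pr ∈ l, pvEq P S pr ∧ (x = P ∨ x = pr.1)) := by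
  induction l with
  | nil =>
    intro mm mm' h x
    simp [pvInnerA] at h
    subst h; simp
  | cons hd rest ih =>
    intro mm mm' h x
    obtain ⟨Q, T⟩ := hd
    obtain ⟨hsub_iff, hsup, hequ, hint⟩ := pv_branches S T
    rw [pvInnerA_cons] at h
    by_cases hPQ : P = Q
    · rw [if_pos hPQ] at h
      rw [ih mm mm' h x]
      constructor
      · rintro (h1 | ⟨pr, hpr, he⟩)
        · exact Or.inl h1
        · exact Or.inr ⟨pr, List.mem_cons_of_mem _ hpr, he⟩
      · rintro (h1 | ⟨pr, hpr, he⟩)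
        · exact Or.inl h1
        · rcases List.mem_cons.mp hpr with hpr | hpr
          · subst hpr; exact absurd hPQ.symm he.1.1
          · exact Or.inr ⟨pr, hpr, he⟩
    · rw [if_neg hPQ] at h
      by_cases hsub : ∀ x ∈ S, x ∈ T
      · rw [if_pos (hsub_iff.mpr hsub)] at h
        by_cases hbig : ∀ x ∈ T, x ∈ S
        · have h2 : ¬ ((PySem.Set.issuperset (PySem.Set.union S (PySem.Set.ofList T)) S
              && !(PySem.Set.equal (PySem.Set.union S (PySem.Set.ofList T)) S)) = true) := by
            simp [hsup, hequ.mpr hbig]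
          rw [if_neg h2, if_pos (hint hsub)] at h
          rw [ih _ mm' h x, PySem.Set.mem_update]
          have heqQ : pvEq P S (Q, T) := ⟨Ne.symm hPQ, hsub, hbig⟩
          constructor
          · rintro ((h1 | h1) | ⟨pr, hpr, he⟩)
            · exact Or.inl h1
            · rcases List.mem_cons.mp h1 with h1 | h1
              · exact Or.inr ⟨(Q, T), List.mem_cons_self, heqQ, Or.inl h1⟩
              · exact Or.inr ⟨(Q, T), List.mem_cons_self, heqQ,
                  Or.inr (by simpa using h1)⟩
            · exact Or.inr ⟨pr, List.mem_cons_of_mem _ hpr, he⟩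
          · rintro (h1 | ⟨pr, hpr, he, hx⟩)
            · exact Or.inl (Or.inl h1)
            · rcases List.mem_cons.mp hpr with hpr | hpr
              · subst hpr
                rcases hx with hx | hx
                · exact Or.inl (Or.inr (by simp [hx]))
                · exact Or.inl (Or.inr (by simp [hx]))
              · exact Or.inr ⟨pr, hpr, And.intro he hx⟩
        · have hne : (PySem.Set.equal (PySem.Set.union S (PySem.Set.ofList T)) S) = false := by
            rcases hq : PySem.Set.equal (PySem.Set.union S (PySem.Set.ofList T)) S
            · rfl
            · exact absurd (hequ.mp hq) hbig
          have h2 : (PySem.Set.issuperset (PySem.Set.union S (PySem.Set.ofList T)) S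
              && !(PySem.Set.equal (PySem.Set.union S (PySem.Set.ofList T)) S)) = true := by
            simp [hsup, hne]
          rw [if_pos h2] at h
          exact absurd h (by simp)
      · have h1 : ¬ (PySem.Set.issubset S (PySem.Set.ofList T) = true) := by
          intro hq; exact hsub (hsub_iff.mp hq)
        rw [if_neg h1] at h
        rw [ih mm mm' h x]
        constructor
        · rintro (hx | ⟨pr, hpr, he⟩)
          · exact Or.inl hx
          · exact Or.inr ⟨pr, List.mem_cons_of_mem _ hpr, he⟩
        · rintro (hx | ⟨pr, hpr, he⟩)
          · exact Or.inl hx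
          · rcases List.mem_cons.mp hpr with hpr | hpr
            · subst hpr; exact absurd he.1.2.1 hsub
            · exact Or.inr ⟨pr, hpr, he⟩

lemma pv_getD_mk (pp : List (String × List String)) (hnd : (pp.map Prod.fst).Nodup)
    {e : String × List String} (he : e ∈ pp) :
    (PySem.Dict.mk pp).getD e.1 ([] : List String) = e.2 := by
  have hi : (e.1, e.2) ∈ (PySem.Dict.mk pp).items := by
    show (e.1, e.2) ∈ pp
    simpa using he
  have hk : (PySem.Dict.mk pp).keys.Nodup := by
    rw [PySem.Dict.keys_mk]; exact hnd
  exact PySem.Dict.getD_of_mem_items _ hi hk []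

-- the cons case of pv_step_eq, stated in iota/zeta-reduced form
lemma pv_cons_eq (pp : List (String × List String)) (hnd : (pp.map Prod.fst).Nodup)
    (m : PySem.Dict String (List String)) (P p0 : String) (rest : List String)
    (hSnd : (p0 :: rest).Nodup) :
    (match pvInnerA P (p0 :: rest) pp PySem.Set.empty with
     | none => m
     | some multimaster =>
       (p0 :: rest).foldl (fun m pep =>
         match m.get? pep with
         | some s => m.insert pep (PySem.Set.add s
             (if multimaster ≠ ([] : List String) then
               (PySem.List.sorted multimaster (fun x => x) false).headD P else P))
         | none => m.insert pep
             [if multimaster ≠ ([] : List String) then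
               (PySem.List.sorted multimaster (fun x => x) false).headD P else P]) m)
    =
    (if (PySem.Set.discard (rest.foldl (fun c pep => PySem.Set.inter c ((pvIndexB pp).getD pep []))
            ((pvIndexB pp).getD p0 [])) P).any
          (fun c => PySem.Set.len (PySem.Set.ofList ((PySem.Dict.mk pp).getD c []))
            > PySem.Set.len (p0 :: rest)) then m
     else (p0 :: rest).foldl (fun m pep =>
         let m1 := m.setdefault pep []
         m1.insert pep (PySem.Set.add (m1.getD pep [])
           ((PySem.List.min? (PySem.Set.union
               (PySem.Set.discard (rest.foldl (fun c pep => PySem.Set.inter c ((pvIndexB pp).getD pep []))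
                 ((pvIndexB pp).getD p0 [])) P) [P]) (fun x => x)).getD P))) m) := by
  -- B's candidate set, characterized by membership
  have hcands : ∀ Q, (Q ∈ PySem.Set.discard
        (rest.foldl (fun c pep => PySem.Set.inter c ((pvIndexB pp).getD pep []))
          ((pvIndexB pp).getD p0 [])) P)
      ↔ (Q ≠ P ∧ ∃ e ∈ pp, e.1 = Q ∧ ∀ x ∈ p0 :: rest, x ∈ e.2) := by
    intro Q
    rw [PySem.Set.mem_discard, pv_mem_foldl_inter, pv_mem_index]
    constructor
    · rintro ⟨⟨⟨e0, he0, hk0, hp0⟩, hrest⟩, hQP⟩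
      refine ⟨hQP, e0, he0, hk0, ?_⟩
      intro x hx
      rcases List.mem_cons.mp hx with rfl | hx
      · exact hp0
      · obtain ⟨e, he, hk, hp⟩ := (pv_mem_index pp Q x).mp (hrest x hx)
        have : e = e0 := pv_key_unique hnd he he0 (by rw [hk, hk0])
        exact this ▸ hp
    · rintro ⟨hQP, e, he, hk, hall⟩
      exact ⟨⟨⟨e, he, hk, hall p0 List.mem_cons_self⟩,
        fun pep hp => (pv_mem_index pp Q pep).mpr ⟨e, he, hk, hall pep (List.mem_cons_of_mem _ hp)⟩⟩, hQP⟩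
  -- B's 'any' test detects exactly the entries that beat P
  have hany : ((PySem.Set.discard
        (rest.foldl (fun c pep => PySem.Set.inter c ((pvIndexB pp).getD pep []))
          ((pvIndexB pp).getD p0 [])) P).any (fun c =>
          PySem.Set.len (PySem.Set.ofList ((PySem.Dict.mk pp).getD c [])) > PySem.Set.len (p0 :: rest)) = true)
      ↔ ∃ e ∈ pp, pvBad P (p0 :: rest) e := by
    rw [List.any_eq_true]
    constructor
    · rintro ⟨c, hc, hf⟩
      obtain ⟨hQP, e, he, hk, hall⟩ := (hcands c).mp hc
      rw [← hk, pv_getD_mk pp hnd he] at hf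
      have hflt := of_decide_eq_true hf
      change ((PySem.Set.ofList e.2).length : ℤ) > (((p0 :: rest) : List String).length : ℤ) at hflt
      have hlen : (p0 :: rest).length < (PySem.Set.ofList e.2).length := by exact_mod_cast hflt
      obtain ⟨x, hxT, hxS⟩ := (pv_sublen hSnd (PySem.Set.nodup_ofList e.2)
        (fun x hx => (PySem.Set.mem_ofList _ _).mpr (hall x hx))).mp hlen
      exact ⟨e, he, hk ▸ hQP, hall, x, (PySem.Set.mem_ofList _ _).mp hxT, hxS⟩
    · rintro ⟨e, he, hne, hall, x, hxT, hxS⟩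
      refine ⟨e.1, (hcands e.1).mpr ⟨hne, e, he, rfl, hall⟩, ?_⟩
      rw [pv_getD_mk pp hnd he]
      have hlen : (p0 :: rest).length < (PySem.Set.ofList e.2).length :=
        (pv_sublen hSnd (PySem.Set.nodup_ofList e.2)
          (fun y hy => (PySem.Set.mem_ofList _ _).mpr (hall y hy))).mpr
          ⟨x, (PySem.Set.mem_ofList _ _).mpr hxT, hxS⟩
      have hgt : PySem.Set.len (PySem.Set.ofList e.2) > PySem.Set.len (p0 :: rest) := by
        change ((PySem.Set.ofList e.2).length : ℤ) > (((p0 :: rest) : List String).length : ℤ)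
        exact_mod_cast hlen
      exact decide_eq_true hgt
  by_cases hbad : ∃ e ∈ pp, pvBad P (p0 :: rest) e
  · rw [(pv_innerA_none_iff P (p0 :: rest) pp PySem.Set.empty).mpr hbad, if_pos (hany.mpr hbad)]
  · rcases hA : pvInnerA P (p0 :: rest) pp PySem.Set.empty with _ | mm
    · exact absurd ((pv_innerA_none_iff P (p0 :: rest) pp PySem.Set.empty).mp hA) hbad
    · rw [if_neg (fun hq => hbad (hany.mp hq))]
      have hmm : ∀ x, x ∈ mm ↔ ∃ e ∈ pp, pvEq P (p0 :: rest) e ∧ (x = P ∨ x = e.1) := by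
        intro x
        rw [pv_innerA_some_mem P (p0 :: rest) pp PySem.Set.empty mm hA x]
        simp [PySem.Set.empty]
      have hcandsE : ∀ Q, (Q ∈ PySem.Set.discard
            (rest.foldl (fun c pep => PySem.Set.inter c ((pvIndexB pp).getD pep []))
              ((pvIndexB pp).getD p0 [])) P)
          ↔ ∃ e ∈ pp, pvEq P (p0 :: rest) e ∧ Q = e.1 := by
        intro Q
        rw [hcands Q]
        constructor
        · rintro ⟨hQP, e, he, hk, hall⟩
          refine ⟨e, he, ⟨hk ▸ hQP, hall, ?_⟩, hk.symm⟩
          intro x hx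
          by_contra hxS
          exact hbad ⟨e, he, hk ▸ hQP, hall, x, hx, hxS⟩
        · rintro ⟨e, he, heq, rfl⟩
          exact ⟨heq.1, e, he, rfl, heq.2.1⟩
      -- the two premasters agree
      have hpre : (if mm ≠ ([] : List String) then
            (PySem.List.sorted mm (fun x => x) false).headD P
          else P)
          = (PySem.List.min? (PySem.Set.union (PySem.Set.discard
              (rest.foldl (fun c pep => PySem.Set.inter c ((pvIndexB pp).getD pep []))
                ((pvIndexB pp).getD p0 [])) P) [P]) (fun x => x)).getD P := by
        by_cases hE : ∃ e ∈ pp, pvEq P (p0 :: rest) e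
        · have hUmm : ∀ x, x ∈ PySem.Set.union (PySem.Set.discard
                (rest.foldl (fun c pep => PySem.Set.inter c ((pvIndexB pp).getD pep []))
                  ((pvIndexB pp).getD p0 [])) P) [P] ↔ x ∈ mm := by
            intro x
            rw [PySem.Set.mem_union, hcandsE x, hmm x]
            constructor
            · rintro (⟨e, he, heq, rfl⟩ | hP)
              · exact ⟨e, he, heq, Or.inr rfl⟩
              · obtain ⟨e, he, heq⟩ := hE
                exact ⟨e, he, heq, Or.inl (by simpa using hP)⟩
            · rintro ⟨e, he, heq, rfl | rfl⟩
              · exact Or.inr (by simp)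
              · exact Or.inl ⟨e, he, heq, rfl⟩
          have hPmm : P ∈ mm := by
            obtain ⟨e, he, heq⟩ := hE
            exact (hmm P).mpr ⟨e, he, heq, Or.inl rfl⟩
          rw [if_pos (by intro h; rw [h] at hPmm; exact absurd hPmm (List.not_mem_nil))]
          rcases hsorted : PySem.List.sorted mm (fun x => x) false with _ | ⟨m0, t⟩
          · exact absurd ((PySem.List.sorted_eq_nil_iff mm _ false).mp hsorted)
              (by intro h; rw [h] at hPmm; exact absurd hPmm (List.not_mem_nil))
          · rcases hmin : PySem.List.min? (PySem.Set.union (PySem.Set.discard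
                (rest.foldl (fun c pep => PySem.Set.inter c ((pvIndexB pp).getD pep []))
                  ((pvIndexB pp).getD p0 [])) P) [P]) (fun x => x) with _ | mB
            · have hnil := (PySem.List.min?_eq_none_iff _ _).mp hmin
              have hPU := (hUmm P).mpr hPmm
              rw [hnil] at hPU
              exact absurd hPU (List.not_mem_nil)
            · have hm0mm : m0 ∈ mm :=
                (PySem.List.mem_sorted mm (fun x => x) false m0).mp (hsorted ▸ List.mem_cons_self)
              have hmBmm : mB ∈ mm := (hUmm mB).mp (PySem.List.min?_mem hmin)
              have h1 : m0 ≤ mB := PySem.List.key_head_sorted_le mm (fun x => x) hsorted mB hmBmm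
              have h2 : mB ≤ m0 := PySem.List.min?_isMin hmin m0 ((hUmm m0).mpr hm0mm)
              simp [le_antisymm h1 h2]
        · have hmmnil : mm = [] := by
            rw [List.eq_nil_iff_forall_not_mem]
            intro x hx
            obtain ⟨e, he, heq, _⟩ := (hmm x).mp hx
            exact hE ⟨e, he, heq⟩
          rw [if_neg (by simp [hmmnil])]
          have hU : ∀ x, x ∈ PySem.Set.union (PySem.Set.discard
                (rest.foldl (fun c pep => PySem.Set.inter c ((pvIndexB pp).getD pep []))
                  ((pvIndexB pp).getD p0 [])) P) [P] ↔ x = P := by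
            intro x
            rw [PySem.Set.mem_union, hcandsE x]
            constructor
            · rintro (⟨e, he, heq, rfl⟩ | hP)
              · exact absurd ⟨e, he, heq⟩ hE
              · simpa using hP
            · rintro rfl; exact Or.inr (by simp)
          rcases hmin : PySem.List.min? (PySem.Set.union (PySem.Set.discard
                (rest.foldl (fun c pep => PySem.Set.inter c ((pvIndexB pp).getD pep []))
                  ((pvIndexB pp).getD p0 [])) P) [P]) (fun x => x) with _ | mB
          · rfl
          · have := (hU mB).mp (PySem.List.min?_mem hmin)
            simp [this]
      show (p0 :: rest).foldl (fun m pep =>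
          match m.get? pep with
          | some s => m.insert pep (PySem.Set.add s
              (if mm ≠ ([] : List String) then
                (PySem.List.sorted mm (fun x => x) false).headD P else P))
          | none => m.insert pep
              [if mm ≠ ([] : List String) then
                (PySem.List.sorted mm (fun x => x) false).headD P else P]) m = _
      rw [hpre]
      exact PySem.List.foldl_congr_mem _ _ _ _ (fun acc x _ => pv_add_step_eq acc x _)

-- the per-protein bodies of the two folds agree
lemma pv_step_eq (pp : List (String × List String)) (hnd : (pp.map Prod.fst).Nodup)
    (m : PySem.Dict String (List String)) (pr : String × List String) :
    (let protein := pr.1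
     let peps : PySem.Set String := PySem.Set.ofList pr.2
     match pvInnerA protein peps pp PySem.Set.empty with
     | none => m
     | some multimaster =>
       let premaster :=
         if multimaster ≠ ([] : List String) then
           (PySem.List.sorted multimaster (fun x => x) false).headD protein
         else protein
       peps.foldl (fun m pep =>
         match m.get? pep with
         | some s => m.insert pep (PySem.Set.add s premaster)
         | none => m.insert pep [premaster]) m)
    =
    (let protein := pr.1
     match (PySem.Set.ofList pr.2 : PySem.Set String) with
     | [] => m
     | pep0 :: restPeps =>
       let peps : PySem.Set String := pep0 :: restPeps
       let cands0 := restPeps.foldl (fun c pep => PySem.Set.inter c ((pvIndexB pp).getD pep []))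
                       ((pvIndexB pp).getD pep0 [])
       let cands := PySem.Set.discard cands0 protein
       if cands.any (fun c =>
            PySem.Set.len (PySem.Set.ofList ((PySem.Dict.mk pp).getD c [])) > PySem.Set.len peps) then
         m
       else
         let premaster := (PySem.List.min? (PySem.Set.union cands [protein]) (fun x => x)).getD protein
         peps.foldl (fun m pep =>
           let m1 := m.setdefault pep []
           m1.insert pep (PySem.Set.add (m1.getD pep []) premaster)) m) := by
  obtain ⟨P, L⟩ := pr
  simp only
  cases hS : (PySem.Set.ofList L : PySem.Set String) with
  | nil =>
    cases pvInnerA P [] pp PySem.Set.empty <;> rfl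
  | cons p0 rest =>
    exact pv_cons_eq pp hnd m P p0 rest (hS ▸ PySem.Set.nodup_ofList L)

-- ===== VERDICT (by name: the statement is the Claim_ definition above) =====
theorem get_masters_spec : Claim_equal_get_masters := by
  intro pp _ hpre
  show get_masters pp = get_masters_alt pp
  unfold get_masters get_masters_alt
  exact congrArg PySem.Dict.items
    (PySem.List.foldl_congr_mem pp _ _ PySem.Dict.empty (fun m x _ => pv_step_eq pp hpre m x))
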